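-- pv_equiv track=rewrite | github.com/Adeimantius/DimityJones | solutions-scripts/decode-1.py | solve
-- ===== SOURCE A (Python) =====
-- def solve(encoded_puzzle_text):
--     numchars = len(encoded_puzzle_text)
--     outtext = ""
--     fwd = 0
--     bck = numchars - 1
--     next = fwd
--     for i in range(0, numchars):
--         outtext += encoded_puzzle_text[next]
--         if i % 2 == 0:
--             fwd += 1
--             next = bck
--         else:
--             bck -= 1
--             next = fwd
--     return outtext
-- ===== SOURCE B (Python) =====
-- def solve(encoded_puzzle_text):
--     mid = (len(encoded_puzzle_text) + 1) // 2
--     front = encoded_puzzle_text[:mid]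
--     back = encoded_puzzle_text[mid:][::-1]
--     res = []
--     for i in range(mid):
--         res.append(front[i])
--         if i < len(back):
--             res.append(back[i])
--     return "".join(res)
-- ===== Notes on version B (the rewrite author's own statement) =====
-- stated objective: simpler
-- what changed: Replaces the parity-toggling fwd/bck/next pointer walk with repeated string concatenation by splitting the string at mid, reversing the tail slice, and interleaving the two slices into a list joined once.
import Mathlib
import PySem

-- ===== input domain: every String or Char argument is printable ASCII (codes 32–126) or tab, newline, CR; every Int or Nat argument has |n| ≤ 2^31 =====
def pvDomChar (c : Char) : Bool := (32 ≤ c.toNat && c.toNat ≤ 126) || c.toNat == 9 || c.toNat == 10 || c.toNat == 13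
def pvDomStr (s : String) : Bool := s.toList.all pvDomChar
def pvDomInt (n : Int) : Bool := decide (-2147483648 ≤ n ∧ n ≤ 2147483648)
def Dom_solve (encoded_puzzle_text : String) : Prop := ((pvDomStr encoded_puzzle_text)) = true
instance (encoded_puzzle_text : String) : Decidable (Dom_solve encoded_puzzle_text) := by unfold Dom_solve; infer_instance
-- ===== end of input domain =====

-- B replaces A's parity-toggling two-pointer walk by splitting the string at mid and
-- interleaving the front slice with the reversed tail slice (objective: simpler).

-- ===== PORT A =====
-- one loop iteration of A: emit s[next], then toggle the fwd/bck pointers on the parity of i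
def stepA (l : List Char) (st : List Char × Int × Int × Int) (i : Int) : List Char × Int × Int × Int :=
  let out := st.1 ++ [(PySem.List.pyGet? l st.2.2.2).getD ' ']   -- index is always in range, so getD is exact
  if i % 2 == 0 then (out, st.2.1 + 1, st.2.2.1, st.2.2.1)
  else (out, st.2.1, st.2.2.1 - 1, st.2.1)

def solve (encoded_puzzle_text : String) : String :=
  let l := encoded_puzzle_text.toList
  let n := l.length
  String.mk ((PySem.List.pyRange 0 n 1).foldl (stepA l) ([], 0, (n : Int) - 1, 0)).1

-- ===== PORT B =====
-- one loop iteration of B: append front[i], and back[i] when it exists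
def stepB (front back : List Char) (res : List Char) (i : Nat) : List Char :=
  let res := res ++ [front.getD i ' ']
  if i < back.length then res ++ [back.getD i ' '] else res

def solve_alt (encoded_puzzle_text : String) : String :=
  let l := encoded_puzzle_text.toList
  let mid := (l.length + 1) / 2
  let front := l.take mid
  let back := (l.drop mid).reverse
  String.mk ((List.range mid).foldl (stepB front back) [])

-- ===== PRECONDITION & SPEC =====
def Spec_solve (encoded_puzzle_text : String) (out : String) : Prop := out = solve_alt encoded_puzzle_text
instance (encoded_puzzle_text : String) (out : String) : Decidable (Spec_solve encoded_puzzle_text out) := by unfold Spec_solve; infer_instance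

-- ===== CLAIM (what is proved, stated in full; the proofs are below) =====
def Claim_equal_solve : Prop := ∀ (encoded_puzzle_text : String), Dom_solve encoded_puzzle_text → Spec_solve encoded_puzzle_text (solve encoded_puzzle_text)

-- ===== LEMMAS AND PROOFS =====

-- the common closed form: output position i holds l[i/2] (even i) or l[n-1-(i-1)/2] (odd i)
def eFn (l : List Char) (i : Nat) : Char :=
  if i % 2 = 0 then l.getD (i / 2) ' ' else l.getD (l.length - 1 - (i - 1) / 2) ' '

lemma A_inv (l : List Char) (k : Nat) (hk : k ≤ l.length) :
    (PySem.List.pyRange 0 k 1).foldl (stepA l) ([], 0, (l.length : Int) - 1, 0)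
    = ((List.range k).map (eFn l), (((k + 1) / 2 : Nat) : Int),
       (l.length : Int) - 1 - ((k / 2 : Nat) : Int),
       if k % 2 = 0 then ((k / 2 : Nat) : Int)
       else (l.length : Int) - 1 - (((k - 1) / 2 : Nat) : Int)) := by
  induction k with
  | zero => simp [PySem.List.pyRange_one_eq_nil]
  | succ k ih =>
    have hsplit : PySem.List.pyRange 0 (↑(k + 1)) 1
        = PySem.List.pyRange 0 (↑k) 1 ++ [(k : Int)] := by
      have h := PySem.List.pyRange_one_succ_right (a := 0) (b := (k : Int)) (by positivity)
      push_cast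
      exact h
    rw [hsplit, List.foldl_append, ih (by omega)]
    simp only [List.foldl, stepA]
    by_cases hpar : k % 2 = 0
    · have hci : ((k : Int) % 2 == 0) = true := by
        simp only [beq_iff_eq]; omega
      rw [if_pos hpar, hci]
      simp only [if_true]
      have hchar : (PySem.List.pyGet? l ((k / 2 : Nat) : Int)).getD ' ' = eFn l k := by
        rw [PySem.List.pyGet?_natCast, eFn, if_pos hpar, List.getD_eq_getElem?_getD]
      refine Prod.ext ?_ (Prod.ext ?_ (Prod.ext ?_ ?_)) <;> simp only
      · rw [hchar, List.range_succ, List.map_append, List.map_singleton]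
      · push_cast; omega
      · have : (k + 1) / 2 = k / 2 := by omega
        rw [this]
      · have h1 : ¬ ((k + 1) % 2 = 0) := by omega
        rw [if_neg h1]
        have : (k + 1 - 1) / 2 = k / 2 := by omega
        rw [this]
    · have hci : ((k : Int) % 2 == 0) = false := by
        simp only [beq_eq_false_iff_ne, ne_eq]; omega
      rw [if_neg hpar, hci]
      simp only [Bool.false_eq_true, if_false]
      have hj : (l.length : Int) - 1 - (((k - 1) / 2 : Nat) : Int)
          = ((l.length - 1 - (k - 1) / 2 : Nat) : Int) := by
        push_cast [Nat.cast_sub]; omega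
      have hchar : (PySem.List.pyGet? l ((l.length : Int) - 1 - (((k - 1) / 2 : Nat) : Int))).getD ' '
          = eFn l k := by
        rw [hj, PySem.List.pyGet?_natCast, eFn, if_neg hpar, List.getD_eq_getElem?_getD]
      refine Prod.ext ?_ (Prod.ext ?_ (Prod.ext ?_ ?_)) <;> simp only
      · rw [hchar, List.range_succ, List.map_append, List.map_singleton]
      · have : (k + 1 + 1) / 2 = (k + 1) / 2 := by omega
        rw [this]
      · push_cast; omega
      · rw [if_pos (by omega : (k + 1) % 2 = 0)]

lemma B_inv (l : List Char) (k : Nat) (hk : k ≤ (l.length + 1) / 2) :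
    (List.range k).foldl (stepB (l.take ((l.length + 1) / 2)) ((l.drop ((l.length + 1) / 2)).reverse)) []
    = (List.range (min (2 * k) l.length)).map (eFn l) := by
  induction k with
  | zero => simp
  | succ k ih =>
    rw [List.range_succ, List.foldl_append, ih (by omega)]
    simp only [List.foldl, stepB, List.length_reverse, List.length_drop]
    have hfront : (l.take ((l.length + 1) / 2)).getD k ' ' = eFn l (2 * k) := by
      rw [List.getD_eq_getElem?_getD, List.getElem?_take_of_lt (by omega), eFn,
        if_pos (by omega)]
      have : 2 * k / 2 = k := by omega
      rw [this, List.getD_eq_getElem?_getD]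
    by_cases hlt : k < l.length - (l.length + 1) / 2
    · rw [if_pos hlt]
      have hback : ((l.drop ((l.length + 1) / 2)).reverse).getD k ' ' = eFn l (2 * k + 1) := by
        rw [List.getD_eq_getElem?_getD,
          List.getElem?_reverse (by simp; omega),
          List.length_drop, List.getElem?_drop, eFn, if_neg (by omega)]
        have : (l.length + 1) / 2 + (l.length - (l.length + 1) / 2 - 1 - k)
            = l.length - 1 - (2 * k + 1 - 1) / 2 := by omega
        rw [this, List.getD_eq_getElem?_getD]
      rw [hfront, hback]
      have h1 : min (2 * k) l.length = 2 * k := by omega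
      have h2 : min (2 * (k + 1)) l.length = 2 * k + 1 + 1 := by omega
      rw [h1, h2, List.range_succ, List.range_succ, List.map_append, List.map_append,
        List.map_singleton, List.map_singleton, List.append_assoc]
    · rw [if_neg hlt, hfront]
      have h1 : min (2 * k) l.length = 2 * k := by omega
      have h2 : min (2 * (k + 1)) l.length = 2 * k + 1 := by omega
      rw [h1, h2, List.range_succ, List.map_append, List.map_singleton]

-- ===== VERDICT (by name: the statement is the Claim_ definition above) =====
theorem solve_spec : Claim_equal_solve := by
  intro s _
  unfold Spec_solve
  dsimp only [solve, solve_alt]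
  rw [A_inv s.toList s.toList.length le_rfl, B_inv s.toList ((s.toList.length + 1) / 2) le_rfl]
  have : min (2 * ((s.toList.length + 1) / 2)) s.toList.length = s.toList.length := by omega
  rw [this]
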